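-- pv_equiv track=rewrite | github.com/RohanMoj1999/Rohan-Mojumder-Portfolio | guess_the_movie_game.py | unlockCharacter
-- ===== SOURCE A (Python) =====
-- def unlockCharacter(chosenChar, question):
--     temp = []
--     # converting the characters to *  except the chosen character and store in list
--     for i in question:
--         if i in chosenChar:
--             temp.append(i)
--         elif i == ' ':
--             temp.append(' ')
--         else:
--             temp.append('*')
--     # converted * string
--     newStr = "".join(str(x) for x in temp)
--     return newStr
-- ===== SOURCE B (Python) =====
-- def unlockCharacter(chosenChar, question):
--     # Build a translation table once (every character of the question that is
--     # neither chosen nor a space maps to '*'), then translate in one call.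
--     keep = set(chosenChar)
--     keep.add(' ')
--     table = {ord(c): '*' for c in set(question) - keep}
--     return question.translate(table)
-- ===== Notes on version B (the rewrite author's own statement) =====
-- stated objective: idiomatic
-- what changed: Replaces the per-character loop with append/branches and join by building a str.translate table once (set difference of the question's characters and the kept characters) and translating in a single C-level library call.
import Mathlib
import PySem

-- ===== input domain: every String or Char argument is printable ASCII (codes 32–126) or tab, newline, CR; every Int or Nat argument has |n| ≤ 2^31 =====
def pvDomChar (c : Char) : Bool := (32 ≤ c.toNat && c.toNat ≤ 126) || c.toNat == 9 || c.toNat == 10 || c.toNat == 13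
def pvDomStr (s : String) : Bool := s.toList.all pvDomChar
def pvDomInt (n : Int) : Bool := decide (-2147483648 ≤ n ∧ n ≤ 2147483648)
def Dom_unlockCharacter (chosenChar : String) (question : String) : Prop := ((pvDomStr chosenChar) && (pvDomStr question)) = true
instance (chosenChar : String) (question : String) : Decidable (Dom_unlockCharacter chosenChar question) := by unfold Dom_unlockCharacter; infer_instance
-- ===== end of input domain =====

-- B replaces A's per-character branch-and-append loop by a translation table
-- (set difference of the question's characters and the kept characters) applied
-- in one translate pass; objective: idiomatic.

-- ===== PORT A =====
-- 'i in chosenChar' for the single character i is membership among chosenChar's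
-- characters (exact for 1-character strings).
def unlockCharacter (chosenChar : String) (question : String) : String :=
  let temp : List Char :=
    question.toList.foldl
      (fun temp i =>
        if i ∈ chosenChar.toList then temp ++ [i]
        else if i = ' ' then temp ++ [' ']
        else temp ++ ['*'])
      []
  String.mk temp

-- ===== PORT B =====
-- question.translate(table): each character replaced by its table entry if present,
-- itself otherwise; the table is only looked up, so set iteration order is immaterial.
def unlockCharacter_alt (chosenChar : String) (question : String) : String :=
  let keep : PySem.Set Char := PySem.Set.add (PySem.Set.ofList chosenChar.toList) ' '
  let table : PySem.Dict Char Char :=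
    (PySem.Set.diff (PySem.Set.ofList question.toList) keep).foldl
      (fun d c => PySem.Dict.insert d c '*') PySem.Dict.empty
  String.mk (question.toList.map (fun c => PySem.Dict.getD table c c))

-- ===== PRECONDITION & SPEC =====
def Spec_unlockCharacter (chosenChar : String) (question : String) (out : String) : Prop := out = unlockCharacter_alt chosenChar question
instance (chosenChar : String) (question : String) (out : String) : Decidable (Spec_unlockCharacter chosenChar question out) := by unfold Spec_unlockCharacter; infer_instance

-- ===== CLAIM (what is proved, stated in full; the proofs are below) =====
def Claim_equal_unlockCharacter : Prop := ∀ (chosenChar : String) (question : String), Dom_unlockCharacter chosenChar question → Spec_unlockCharacter chosenChar question (unlockCharacter chosenChar question)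

-- ===== LEMMAS AND PROOFS =====

-- Lookup in a dict built by inserting '*' at every key of l.
theorem getD_star_foldl (l : List Char) (d0 : PySem.Dict Char Char) (c : Char) :
    PySem.Dict.getD (l.foldl (fun d c => PySem.Dict.insert d c '*') d0) c c
      = if c ∈ l then '*' else PySem.Dict.getD d0 c c := by
  induction l generalizing d0 with
  | nil => simp
  | cons x xs ih =>
      simp only [List.foldl_cons, ih, List.mem_cons]
      by_cases hx : c = x
      · subst hx
        simp
      · simp [PySem.Dict.getD_insert, hx]

theorem table_getD (chosenChar question : String) (c : Char) (hc : c ∈ question.toList) :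
    PySem.Dict.getD
      ((PySem.Set.diff (PySem.Set.ofList question.toList)
          (PySem.Set.add (PySem.Set.ofList chosenChar.toList) ' ')).foldl
        (fun d c => PySem.Dict.insert d c '*') PySem.Dict.empty) c c
      = if c ∈ chosenChar.toList then c else if c = ' ' then ' ' else '*' := by
  rw [getD_star_foldl]
  have hmem : c ∈ PySem.Set.diff (PySem.Set.ofList question.toList)
      (PySem.Set.add (PySem.Set.ofList chosenChar.toList) ' ')
      ↔ ¬ (c ∈ chosenChar.toList ∨ c = ' ') := by
    simp [PySem.Set.mem_diff, PySem.Set.mem_add, PySem.Set.mem_ofList, hc]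
  by_cases h1 : c ∈ chosenChar.toList
  · have : c ∉ _ := fun h => (hmem.mp h) (Or.inl h1)
    simp [this, h1]
  · by_cases h2 : c = ' '
    · have : c ∉ _ := fun h => (hmem.mp h) (Or.inr h2)
      simp [h2]
    · have : c ∈ _ := hmem.mpr (by tauto)
      simp [this, h1, h2]

-- ===== VERDICT (by name: the statement is the Claim_ definition above) =====
theorem unlockCharacter_spec : Claim_equal_unlockCharacter := by
  intro chosenChar question _
  show _ = _
  unfold unlockCharacter unlockCharacter_alt
  simp only []
  congr 1
  have hA : question.toList.foldl
      (fun temp i =>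
        if i ∈ chosenChar.toList then temp ++ [i]
        else if i = ' ' then temp ++ [' ']
        else temp ++ ['*']) []
      = question.toList.map
          (fun i => if i ∈ chosenChar.toList then i else if i = ' ' then ' ' else '*') := by
    have := PySem.List.foldl_append_singleton_eq_map
      (f := fun i => if i ∈ chosenChar.toList then i else if i = ' ' then ' ' else '*')
      (l := question.toList) (acc := ([] : List Char))
    rw [List.nil_append] at this
    rw [← this]
    congr 1
    funext acc i
    by_cases h1 : i ∈ chosenChar.toList <;> by_cases h2 : i = ' ' <;> simp [h1, h2]
  rw [hA]
  apply List.map_congr_left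
  intro c hc
  rw [table_getD chosenChar question c hc]
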